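-- pv_equiv track=rewrite | github.com/sechastain/advent-of-code-solutions | 2023/day02/day02.py | isPossibleGame
-- ===== SOURCE A (Python) =====
-- from functools import reduce
--
-- def isPossibleGame(draws, red=12, blue=14, green=13):
--   max = {'red': red, 'blue': blue, 'green': green}
--   totals = {'red': 0, 'blue': 0, 'green': 0}
--
--   def reduceFn(totals, draw):
--     for k in totals.keys():
--       totals[k] = draw[k] if k in draw and draw[k] > totals[k] else totals[k]
--     return totals
--
--   reduce(reduceFn, draws, totals)
--
--   for k in max.keys():
--     if totals[k] > max[k]:
--       return False
--
--   return True
-- ===== SOURCE B (Python) =====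
-- def isPossibleGame(draws, red=12, blue=14, green=13):
--     # Fewest cubes needed of a color = the largest count of it any draw shows
--     # (never fewer than zero); the game is possible when each need fits its limit.
--     def needed(color):
--         return max([draw[color] for draw in draws if color in draw] + [0])
--     return needed('red') <= red and needed('blue') <= blue and needed('green') <= green
-- ===== Notes on version B (the rewrite author's own statement) =====
-- stated objective: simpler
-- what changed: Replaces the reduce-built mutable running-max totals dict and the trailing key-check loop with a per-color 'needed = max of that color's counts (at least 0)' computed by the builtin max over a comprehension, combined with a single boolean conjunction.
import Mathlib
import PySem

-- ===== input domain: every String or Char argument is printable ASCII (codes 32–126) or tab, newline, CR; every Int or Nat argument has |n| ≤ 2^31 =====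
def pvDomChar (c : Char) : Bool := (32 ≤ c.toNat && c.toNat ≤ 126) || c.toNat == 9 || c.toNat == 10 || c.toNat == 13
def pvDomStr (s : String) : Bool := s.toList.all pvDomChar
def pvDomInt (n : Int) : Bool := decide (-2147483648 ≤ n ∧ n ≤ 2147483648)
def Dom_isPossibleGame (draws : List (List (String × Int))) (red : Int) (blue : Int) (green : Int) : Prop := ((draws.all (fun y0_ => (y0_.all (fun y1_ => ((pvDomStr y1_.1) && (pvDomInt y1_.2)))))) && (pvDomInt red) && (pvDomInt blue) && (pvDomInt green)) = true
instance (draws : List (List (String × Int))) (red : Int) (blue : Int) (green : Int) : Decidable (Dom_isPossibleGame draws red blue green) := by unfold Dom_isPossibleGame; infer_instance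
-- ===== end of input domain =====

-- B replaces A's reduce-built mutable running-max totals dict and trailing key-check
-- loop by a per-color "needed cubes" computed with builtin max over a comprehension,
-- combined in one boolean conjunction (objective: simpler). No caller-visible mutation.

-- dict indexing on a draw (association list, first match), shared by both ports
def drawGet? (d : List (String × Int)) (k : String) : Option Int :=
  (d.find? (fun p => p.1 == k)).map (·.2)

-- ===== PORT A =====
-- reduceFn: for k in totals.keys(): totals[k] = draw[k] if k in draw and draw[k] > totals[k] else totals[k]
def reduceFnA (totals : PySem.Dict String Int) (draw : List (String × Int)) : PySem.Dict String Int :=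
  totals.keys.foldl (fun t k =>
    t.insert k (match drawGet? draw k with
                | some v => if v > t.getD k 0 then v else t.getD k 0
                | none => t.getD k 0)) totals

-- for k in max.keys(): if totals[k] > max[k]: return False; (keys always present, getD 0 exact)
def checkLoopA (totals maxd : PySem.Dict String Int) : List String → Bool
  | [] => true
  | k :: ks => if totals.getD k 0 > maxd.getD k 0 then false else checkLoopA totals maxd ks

def isPossibleGame (draws : List (List (String × Int))) (red : Int) (blue : Int) (green : Int) : Bool :=
  let maxd : PySem.Dict String Int := ((PySem.Dict.empty.insert "red" red).insert "blue" blue).insert "green" green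
  let totals0 : PySem.Dict String Int := ((PySem.Dict.empty.insert "red" (0:Int)).insert "blue" 0).insert "green" 0
  let totals := draws.foldl reduceFnA totals0
  checkLoopA totals maxd maxd.keys

-- ===== PORT B =====
-- needed(color) = max([draw[color] for draw in draws if color in draw] + [0]);
-- the list ends in 0, so max? is never none (the getD 0 only makes the call total)
def neededB (draws : List (List (String × Int))) (color : String) : Int :=
  (PySem.List.max? ((draws.filterMap (fun draw => drawGet? draw color)) ++ [0]) (fun x => x)).getD 0

-- return needed('red') <= red and needed('blue') <= blue and needed('green') <= green
def isPossibleGame_alt (draws : List (List (String × Int))) (red : Int) (blue : Int) (green : Int) : Bool :=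
  neededB draws "red" ≤ red && (neededB draws "blue" ≤ blue && neededB draws "green" ≤ green)

-- ===== PRECONDITION & SPEC =====
def Spec_isPossibleGame (draws : List (List (String × Int))) (red : Int) (blue : Int) (green : Int) (out : Bool) : Prop := out = isPossibleGame_alt draws red blue green
instance (draws : List (List (String × Int))) (red : Int) (blue : Int) (green : Int) (out : Bool) : Decidable (Spec_isPossibleGame draws red blue green out) := by unfold Spec_isPossibleGame; infer_instance

-- ===== CLAIM (what is proved, stated in full; the proofs are below) =====
def Claim_equal_isPossibleGame : Prop := ∀ (draws : List (List (String × Int))) (red : Int) (blue : Int) (green : Int), Dom_isPossibleGame draws red blue green → Spec_isPossibleGame draws red blue green (isPossibleGame draws red blue green)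

-- ===== LEMMAS AND PROOFS =====

-- the per-color running-max update performed by reduceFnA
def updA (x : Int) (draw : List (String × Int)) (k : String) : Int :=
  match drawGet? draw k with
  | some v => if v > x then v else x
  | none => x

lemma reduceFnA_mk (a b c : Int) (draw : List (String × Int)) :
    reduceFnA (PySem.Dict.mk [("red", a), ("blue", b), ("green", c)]) draw
      = PySem.Dict.mk [("red", updA a draw "red"), ("blue", updA b draw "blue"), ("green", updA c draw "green")] := by
  simp [reduceFnA, updA, PySem.Dict.keys, PySem.Dict.insert, PySem.Dict.getD, PySem.Dict.get?,
        PySem.Dict.contains, List.foldl]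

lemma foldl_reduceFnA (draws : List (List (String × Int))) (a b c : Int) :
    draws.foldl reduceFnA (PySem.Dict.mk [("red", a), ("blue", b), ("green", c)])
      = PySem.Dict.mk [("red", draws.foldl (fun x d => updA x d "red") a),
                       ("blue", draws.foldl (fun x d => updA x d "blue") b),
                       ("green", draws.foldl (fun x d => updA x d "green") c)] := by
  induction draws generalizing a b c with
  | nil => rfl
  | cons d ds ih => simp [List.foldl, reduceFnA_mk, ih]

-- A's per-color running max (seeded at 0) IS B's needed(color)
lemma foldl_updA_eq (k : String) (draws : List (List (String × Int))) :
    ∀ a : Int, draws.foldl (fun x d => updA x d k) a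
      = (draws.filterMap (fun d => drawGet? d k)).foldl max a := by
  induction draws with
  | nil => intro a; rfl
  | cons d ds ih =>
    intro a
    rw [List.foldl_cons, List.filterMap_cons]
    cases h : drawGet? d k with
    | none => simpa [updA, h] using ih a
    | some v =>
      have hu : updA a d k = max a v := by
        unfold updA; rw [h]
        rcases lt_or_ge a v with hv | hv <;> simp [max_def] <;> omega
      simp only [hu, List.foldl_cons]
      exact ih (max a v)

lemma foldl_max_max (t : List Int) (a b : Int) :
    t.foldl max (max a b) = max a (t.foldl max b) := by
  induction t generalizing b with
  | nil => rfl
  | cons c t ih => simp only [List.foldl, max_assoc, ih]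

lemma foldl_updA_eq_neededB (draws : List (List (String × Int))) (k : String) :
    draws.foldl (fun x d => updA x d k) 0 = neededB draws k := by
  rw [foldl_updA_eq k draws 0]
  unfold neededB
  cases h : draws.filterMap (fun d => drawGet? d k) with
  | nil => simp [PySem.List.max?]
  | cons x t =>
    simp only [List.cons_append, PySem.List.max?_id_cons, Option.getD_some,
               List.foldl_append, List.foldl]
    rw [foldl_max_max t 0 x]
    exact (max_comm _ _)

-- ===== VERDICT (by name: the statement is the Claim_ definition above) =====
theorem isPossibleGame_spec : Claim_equal_isPossibleGame := by
  intro draws red blue green _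
  show isPossibleGame draws red blue green = isPossibleGame_alt draws red blue green
  unfold isPossibleGame isPossibleGame_alt
  have hmk : ((PySem.Dict.empty.insert "red" (0:Int)).insert "blue" 0).insert "green" 0
      = PySem.Dict.mk [("red", (0:Int)), ("blue", 0), ("green", 0)] := by decide
  have hmax : ((PySem.Dict.empty.insert "red" red).insert "blue" blue).insert "green" green
      = PySem.Dict.mk [("red", red), ("blue", blue), ("green", green)] := by
    simp [PySem.Dict.insert, PySem.Dict.contains, PySem.Dict.empty]
  simp only [hmk, hmax, foldl_reduceFnA, foldl_updA_eq_neededB]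
  simp only [checkLoopA, PySem.Dict.keys, List.map, PySem.Dict.getD, PySem.Dict.get?_mk_cons]
  norm_num
  by_cases h1 : neededB draws "red" ≤ red <;>
    by_cases h2 : neededB draws "blue" ≤ blue <;>
      by_cases h3 : neededB draws "green" ≤ green <;>
        (simp [h1, h2, h3]; try omega)
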